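-- pv_equiv track=rewrite | github.com/minhnghia2208/P3_Indexing | Indexing.py | matchingWindow
-- ===== SOURCE A (Python) =====
-- def matchingWindow(index, p):
--     # @param {int} current: current index of docId window
--     # @return {bool} ans: if phrase is not construtible from docId
--     def recur(current, pos):
--         if current >= len(index)-1:
--             return True
--
--         next = current + 1
--         for i in range(pos, len(index[current])):
--             for j in range(0, len(index[next])):
--                 dis = index[next][j] - index[current][i]
--                 if dis > 0 and dis <= p:
--                     return recur(next, j)
--         return False
--     return recur(0, 0)
-- ===== SOURCE B (Python) =====
-- def matchingWindow(index, p):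
--     # Walk the row transitions iteratively; per transition, sort the next row once
--     # and use a hand-rolled binary search for the smallest element > current value
--     # to decide whether any position within distance p exists; on success a single
--     # linear scan recovers the first such position index.
--     pos = 0
--     for k in range(len(index) - 1):
--         cur = index[k]
--         nxt = index[k + 1]
--         s = sorted(nxt)
--         hit = None
--         for i in range(pos, len(cur)):
--             c = cur[i]
--             lo, hi = 0, len(s)
--             while lo < hi:  # bisect-right: first index with s[lo] > c
--                 mid = (lo + hi) // 2
--                 if s[mid] <= c:
--                     lo = mid + 1
--                 else:
--                     hi = mid
--             if lo < len(s) and s[lo] <= c + p: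
--                 for j, v in enumerate(nxt):
--                     if c < v <= c + p:
--                         hit = j
--                         break
--                 break
--         if hit is None:
--             return False
--         pos = hit
--     return True
-- ===== Notes on version B (the rewrite author's own statement) =====
-- stated objective: alternative
-- what changed: Replaced A's recursion with an iterative row loop that sorts each next row once and binary-searches it for the smallest position exceeding the current one, so the full inner scan of the next row runs at most once per transition instead of once per candidate position.
import Mathlib
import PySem

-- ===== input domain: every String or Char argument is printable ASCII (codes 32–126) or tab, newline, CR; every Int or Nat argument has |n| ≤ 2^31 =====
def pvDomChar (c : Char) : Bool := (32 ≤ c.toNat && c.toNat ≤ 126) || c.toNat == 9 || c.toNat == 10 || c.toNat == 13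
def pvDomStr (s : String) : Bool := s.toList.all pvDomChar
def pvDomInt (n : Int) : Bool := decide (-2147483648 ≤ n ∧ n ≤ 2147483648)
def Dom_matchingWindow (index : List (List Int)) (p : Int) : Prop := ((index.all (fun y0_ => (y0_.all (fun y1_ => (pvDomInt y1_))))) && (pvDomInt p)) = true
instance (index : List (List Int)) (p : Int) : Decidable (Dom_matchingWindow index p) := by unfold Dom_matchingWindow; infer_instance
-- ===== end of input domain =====

-- Alternative: B replaces A's recursive greedy walk with an iterative row loop that
-- sorts each next row once and binary-searches it for the smallest position exceeding
-- the current one; the worst-case per-transition cost changes shape, not the result.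

-- ===== PORT A =====
-- inner 'for j in range(0, len(index[next]))' loop: first j with 0 < dis <= p
def aLoopJ (nxt : List Int) (c p : Int) (j : Nat) : Option Nat :=
  match nxt with
  | [] => none
  | v :: rest => if 0 < v - c ∧ v - c ≤ p then some j else aLoopJ rest c p (j + 1)

-- outer 'for i in range(pos, len(index[current]))' loop (caller passes the dropped prefix)
def aLoopI (cur : List Int) (nxt : List Int) (p : Int) : Option Nat :=
  match cur with
  | [] => none
  | c :: rest =>
    match aLoopJ nxt c p 0 with
    | some j => some j
    | none => aLoopI rest nxt p

-- recur(current, pos); index[current] / index[next] are always in range when read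
def aRecur (index : List (List Int)) (p : Int) (current pos : Nat) : Bool :=
  if current + 1 ≥ index.length then true
  else
    match aLoopI ((index.getD current []).drop pos) (index.getD (current + 1) []) p with
    | some j => aRecur index p (current + 1) j
    | none => false
termination_by index.length - current
decreasing_by omega

def matchingWindow (index : List (List Int)) (p : Int) : Bool := aRecur index p 0 0

-- ===== PORT B =====
-- hand-rolled bisect-right while-loop from Source B; s[mid] is always in range when read
def bBisect (s : List Int) (c : Int) (lo hi : Nat) : Nat :=
  if lo < hi then
    let mid := (lo + hi) / 2
    if s.getD mid 0 ≤ c then bBisect s c (mid + 1) hi else bBisect s c lo mid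
  else lo
termination_by hi - lo
decreasing_by all_goals omega

-- 'for j, v in enumerate(nxt)' break loop: first j with c < v <= c + p
def bFirstJ (nxt : List Int) (c p : Int) (j : Nat) : Option Nat :=
  match nxt with
  | [] => none
  | v :: rest => if c < v ∧ v ≤ c + p then some j else bFirstJ rest c p (j + 1)

-- 'for i in range(pos, len(cur))' loop (caller passes the dropped prefix); returns hit
def bScanI (cur s nxt : List Int) (p : Int) : Option Nat :=
  match cur with
  | [] => none
  | c :: rest =>
    let lo := bBisect s c 0 s.length
    if lo < s.length ∧ s.getD lo 0 ≤ c + p then bFirstJ nxt c p 0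
    else bScanI rest s nxt p

-- 'for k in range(len(index) - 1)' loop carrying pos, as recursion over the tail
def bGo (cur : List Int) (rest : List (List Int)) (p : Int) (pos : Nat) : Bool :=
  match rest with
  | [] => true
  | nxt :: rest' =>
    match bScanI (cur.drop pos) (PySem.List.sorted nxt (fun x => x) false) nxt p with
    | some j => bGo nxt rest' p j
    | none => false

def matchingWindow_alt (index : List (List Int)) (p : Int) : Bool :=
  match index with
  | [] => true
  | cur :: rest => bGo cur rest p 0

-- ===== PRECONDITION & SPEC =====
def Spec_matchingWindow (index : List (List Int)) (p : Int) (out : Bool) : Prop := out = matchingWindow_alt index p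
instance (index : List (List Int)) (p : Int) (out : Bool) : Decidable (Spec_matchingWindow index p out) := by unfold Spec_matchingWindow; infer_instance

-- ===== CLAIM (what is proved, stated in full; the proofs are below) =====
def Claim_equal_matchingWindow : Prop := ∀ (index : List (List Int)) (p : Int), Dom_matchingWindow index p → Spec_matchingWindow index p (matchingWindow index p)

-- ===== LEMMAS AND PROOFS =====

-- the two first-match scans over the next row agree (the conditions are equivalent)
theorem loopJ_eq_firstJ (nxt : List Int) (c p : Int) (j : Nat) :
    aLoopJ nxt c p j = bFirstJ nxt c p j := by
  induction nxt generalizing j with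
  | nil => rfl
  | cons v rest ih =>
      simp only [aLoopJ, bFirstJ]
      by_cases h : c < v ∧ v ≤ c + p
      · rw [if_pos (by omega), if_pos h]
      · rw [if_neg (by omega), if_neg h, ih]

theorem firstJ_isSome (nxt : List Int) (c p : Int) (j : Nat) :
    (bFirstJ nxt c p j).isSome = true ↔ ∃ v ∈ nxt, c < v ∧ v ≤ c + p := by
  induction nxt generalizing j with
  | nil => simp [bFirstJ]
  | cons v rest ih =>
      simp only [bFirstJ]
      by_cases h : c < v ∧ v ≤ c + p
      · simp [h]
      · simp only [if_neg h, ih, List.mem_cons]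
        constructor
        · rintro ⟨w, hw, hc⟩; exact ⟨w, Or.inr hw, hc⟩
        · rintro ⟨w, hw | hw, hc⟩
          · exact absurd (hw ▸ hc) h
          · exact ⟨w, hw, hc⟩

theorem getD_mono_of_pairwise (s : List Int) (hs : s.Pairwise (· ≤ ·))
    {i j : Nat} (hij : i ≤ j) (hj : j < s.length) : s.getD i 0 ≤ s.getD j 0 := by
  rcases Nat.eq_or_lt_of_le hij with rfl | h
  · exact le_rfl
  · rw [List.getD_eq_getElem s 0 (by omega), List.getD_eq_getElem s 0 hj]
    exact List.pairwise_iff_getElem.mp hs i j (by omega) hj h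

theorem bBisect_spec (s : List Int) (c : Int) (lo hi : Nat) :
    s.Pairwise (· ≤ ·) → lo ≤ hi → hi ≤ s.length →
    (∀ j, j < lo → s.getD j 0 ≤ c) →
    (∀ j, hi ≤ j → j < s.length → c < s.getD j 0) →
    (∀ j, j < bBisect s c lo hi → s.getD j 0 ≤ c) ∧
    (∀ j, bBisect s c lo hi ≤ j → j < s.length → c < s.getD j 0) ∧
    lo ≤ bBisect s c lo hi ∧ bBisect s c lo hi ≤ hi := by
  fun_induction bBisect s c lo hi with
  | case1 lo hi hlt mid hmid ih =>
      intro hs h1 h2 h3 h4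
      have hmlt : mid < s.length := by omega
      have := ih hs (by omega) h2
        (fun j hj => by
          have : j ≤ mid := by omega
          exact le_trans (getD_mono_of_pairwise s hs this hmlt) hmid)
        h4
      exact ⟨this.1, this.2.1, by omega, this.2.2.2⟩
  | case2 lo hi hlt mid hmid ih =>
      intro hs h1 h2 h3 h4
      have := ih hs (by omega) (by omega) h3
        (fun j hj hjl => lt_of_lt_of_le (lt_of_not_ge hmid) (getD_mono_of_pairwise s hs hj hjl))
      exact ⟨this.1, this.2.1, this.2.2.1, by omega⟩
  | case3 lo hi hge =>
      intro hs h1 h2 h3 h4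
      exact ⟨h3, fun j hj hjl => h4 j (by omega) hjl, le_rfl, h1⟩

-- B's bisect test on the sorted row decides exactly whether A's inner scan finds a match
theorem exists_iff_bisect (nxt : List Int) (c p : Int) :
    (∃ v ∈ nxt, c < v ∧ v ≤ c + p) ↔
      (bBisect (PySem.List.sorted nxt (fun x => x) false) c 0
          (PySem.List.sorted nxt (fun x => x) false).length <
        (PySem.List.sorted nxt (fun x => x) false).length ∧
       (PySem.List.sorted nxt (fun x => x) false).getD
          (bBisect (PySem.List.sorted nxt (fun x => x) false) c 0
            (PySem.List.sorted nxt (fun x => x) false).length) 0 ≤ c + p) := by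
  set s := PySem.List.sorted nxt (fun x => x) false with hsdef
  have hs : s.Pairwise (· ≤ ·) := by
    rw [hsdef]; exact PySem.List.sorted_pairwise nxt (fun x => x)
  have hmem : ∀ v, v ∈ s ↔ v ∈ nxt := fun v => by
    rw [hsdef]; exact PySem.List.mem_sorted nxt (fun x => x) false v
  obtain ⟨hlow, hhigh, -, hle⟩ :=
    bBisect_spec s c 0 s.length hs (by omega) le_rfl
      (fun j hj => absurd hj (by omega)) (fun j hj hjl => absurd hjl (by omega))
  set r := bBisect s c 0 s.length with hrdef
  constructor
  · rintro ⟨v, hv, hcv, hvp⟩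
    obtain ⟨k, hk, hkv⟩ := List.getElem_of_mem ((hmem v).mpr hv)
    have hknr : r ≤ k := by
      by_contra hkr
      have := hlow k (by omega)
      rw [List.getD_eq_getElem s 0 hk, hkv] at this; omega
    refine ⟨by omega, ?_⟩
    calc s.getD r 0 ≤ s.getD k 0 := getD_mono_of_pairwise s hs hknr hk
      _ = v := by rw [List.getD_eq_getElem s 0 hk, hkv]
      _ ≤ c + p := hvp
  · rintro ⟨hr, hrp⟩
    refine ⟨s.getD r 0, (hmem _).mp ?_, hhigh r le_rfl hr, hrp⟩
    rw [List.getD_eq_getElem s 0 hr]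
    exact List.getElem_mem hr

theorem loopI_eq_scanI (nxt : List Int) (p : Int) (cur : List Int) :
    aLoopI cur nxt p = bScanI cur (PySem.List.sorted nxt (fun x => x) false) nxt p := by
  induction cur with
  | nil => rfl
  | cons c rest ih =>
      simp only [aLoopI, bScanI, loopJ_eq_firstJ]
      cases hbf : bFirstJ nxt c p 0 with
      | some j =>
          have h : ∃ v ∈ nxt, c < v ∧ v ≤ c + p :=
            (firstJ_isSome nxt c p 0).mp (by simp [hbf])
          rw [if_pos ((exists_iff_bisect nxt c p).mp h)]
      | none =>
          have h : ¬ ∃ v ∈ nxt, c < v ∧ v ≤ c + p := by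
            intro hc
            have := (firstJ_isSome nxt c p 0).mpr hc
            simp [hbf] at this
          rw [if_neg (fun hc => h ((exists_iff_bisect nxt c p).mpr hc)), ih]

theorem aRecur_eq_bGo (p : Int) (index : List (List Int)) :
    ∀ (rest : List (List Int)) (cur : List Int) (current pos : Nat),
      index.drop current = cur :: rest → aRecur index p current pos = bGo cur rest p pos := by
  intro rest
  induction rest with
  | nil =>
      intro cur current pos hdrop
      have hlen : index.length = current + 1 := by
        have := congrArg List.length hdrop
        rw [List.length_drop] at this
        simp at this; omega
      rw [aRecur, if_pos (by omega)]
      rfl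
  | cons nxt rest' ih =>
      intro cur current pos hdrop
      have hlen : current + 2 ≤ index.length := by
        have := congrArg List.length hdrop
        rw [List.length_drop] at this
        simp at this; omega
      have hc : index[current]? = some cur := by
        have : (index.drop current)[0]? = some cur := by rw [hdrop]; rfl
        rwa [List.getElem?_drop, Nat.add_zero] at this
      have hn : index[current + 1]? = some nxt := by
        have : (index.drop current)[1]? = some nxt := by rw [hdrop]; rfl
        rwa [List.getElem?_drop] at this
      rw [aRecur, if_neg (by omega)]
      rw [List.getD_eq_getElem?_getD, List.getD_eq_getElem?_getD, hc, hn]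
      simp only [Option.getD_some]
      rw [show aLoopI (cur.drop pos) nxt p
            = bScanI (cur.drop pos) (PySem.List.sorted nxt (fun x => x) false) nxt p
          from loopI_eq_scanI nxt p (cur.drop pos)]
      show _ = bGo cur (nxt :: rest') p pos
      rw [bGo]
      cases bScanI (cur.drop pos) (PySem.List.sorted nxt (fun x => x) false) nxt p with
      | none => rfl
      | some j =>
          exact ih nxt (current + 1) j (by
            have : index.drop (current + 1) = (index.drop current).drop 1 := by
              rw [List.drop_drop]
            rw [this, hdrop]; rfl)

-- ===== VERDICT (by name: the statement is the Claim_ definition above) =====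
theorem matchingWindow_spec : Claim_equal_matchingWindow := by
  intro index p _
  show matchingWindow index p = matchingWindow_alt index p
  cases index with
  | nil =>
      show aRecur [] p 0 0 = true
      rw [aRecur]
      simp
  | cons cur rest =>
      exact aRecur_eq_bGo p (cur :: rest) rest cur 0 0 rfl
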